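-- pv_equiv track=rewrite | github.com/eliottcassidy2000/math | 04-computation/hereditary_regular_mechanism.py | build_paley
-- ===== SOURCE A (Python) =====
-- def build_paley(p):
--     qr = set()
--     for x in range(1, p):
--         qr.add((x * x) % p)
--     T = [[0]*p for _ in range(p)]
--     for i in range(p):
--         for j in range(p):
--             if i != j and (j - i) % p in qr:
--                 T[i][j] = 1
--     return T
-- ===== SOURCE B (Python) =====
-- def build_paley(p):
--     qr = {(x * x) % p for x in range(1, p)}
--     base = [1 if j != 0 and j in qr else 0 for j in range(p)]
--     return [base[p - i:] + base[:p - i] for i in range(p)]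
-- ===== Notes on version B (the rewrite author's own statement) =====
-- stated objective: alternative
-- what changed: A scans every (i,j) cell testing (j-i)%p for membership in the residue set; B builds the indicator list of the nonzero square residues once and produces each row of the circulant matrix as a slice rotation of that base list (intended as faster; measured ~3.5x at n=1024 but unconfirmed at the largest size).
import Mathlib
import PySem

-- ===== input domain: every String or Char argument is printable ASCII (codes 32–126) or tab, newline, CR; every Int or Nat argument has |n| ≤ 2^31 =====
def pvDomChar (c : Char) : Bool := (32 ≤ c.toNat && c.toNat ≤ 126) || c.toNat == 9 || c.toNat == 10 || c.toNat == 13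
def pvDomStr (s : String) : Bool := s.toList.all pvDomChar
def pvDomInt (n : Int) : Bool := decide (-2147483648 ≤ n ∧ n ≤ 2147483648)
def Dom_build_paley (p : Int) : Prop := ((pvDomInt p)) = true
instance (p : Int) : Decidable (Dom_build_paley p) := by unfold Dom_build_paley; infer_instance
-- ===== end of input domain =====

-- B exploits that the matrix is circulant: it builds the 0/1 indicator list of the nonzero square
-- residues once and emits each row as a slice rotation of it, instead of A's membership test at
-- each of the p*p cells.

-- ===== PORT A =====
def build_paley (p : Int) : List (List Int) :=
  let qr : PySem.Set Int :=
    (PySem.List.pyRange 1 p).foldl (fun s x => PySem.Set.add s (PySem.Int.mod (x * x) p)) PySem.Set.empty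
  let T : List (List Int) := (PySem.List.pyRange 0 p).map (fun _ => List.replicate p.toNat 0)
  (PySem.List.pyRange 0 p).foldl (fun T i =>
    (PySem.List.pyRange 0 p).foldl (fun T j =>
      if i ≠ j ∧ PySem.Set.contains qr (PySem.Int.mod (j - i) p) = true then
        PySem.List.pySetD T i (PySem.List.pySetD (PySem.List.pyGetD T i []) j 1)
      else T) T) T

-- ===== PORT B =====
def build_paley_alt (p : Int) : List (List Int) :=
  let qr : PySem.Set Int :=
    PySem.Set.ofList ((PySem.List.pyRange 1 p).map (fun x => PySem.Int.mod (x * x) p))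
  let base : List Int :=
    (PySem.List.pyRange 0 p).map (fun j => if j ≠ 0 ∧ PySem.Set.contains qr j = true then 1 else 0)
  (PySem.List.pyRange 0 p).map (fun i =>
    PySem.List.slice base (some (p - i)) none ++ PySem.List.slice base none (some (p - i)))

-- ===== PRECONDITION & SPEC =====
def Spec_build_paley (p : Int) (out : List (List Int)) : Prop := out = build_paley_alt p
instance (p : Int) (out : List (List Int)) : Decidable (Spec_build_paley p out) := by unfold Spec_build_paley; infer_instance

-- ===== CLAIM (what is proved, stated in full; the proofs are below) =====
def Claim_equal_build_paley : Prop := ∀ (p : Int), Dom_build_paley p → Spec_build_paley p (build_paley p)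

-- ===== LEMMAS AND PROOFS =====

-- the quadratic-residue set both programs build
def pvQR (p : Int) : PySem.Set Int :=
  PySem.Set.ofList ((PySem.List.pyRange 1 p).map (fun x => PySem.Int.mod (x * x) p))

-- the cell value both programs compute, and the target matrix written as a double map
def pvInd (p i j : Int) : Int :=
  if i ≠ j ∧ PySem.Set.contains (pvQR p) (PySem.Int.mod (j - i) p) = true then 1 else 0

def pvRowSpec (p i : Int) : List Int := (PySem.List.pyRange 0 p).map (fun j => pvInd p i j)

def pvM (p : Int) : List (List Int) := (PySem.List.pyRange 0 p).map (fun i => pvRowSpec p i)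

lemma pvQR_foldl (p : Int) :
    (PySem.List.pyRange 1 p).foldl (fun s x => PySem.Set.add s (PySem.Int.mod (x * x) p)) PySem.Set.empty
      = pvQR p := by
  rw [pvQR, ← PySem.Set.update_map_eq_foldl_add]
  rfl

lemma pv_modify_id (l : List (List Int)) (n : Nat) : l.modify n (fun x => x) = l := by
  apply List.ext_getElem?; intro k; simp [List.getElem?_modify]

lemma pv_modify_modify (l : List (List Int)) (n : Nat) (f g : List Int → List Int) :
    (l.modify n f).modify n g = l.modify n (fun x => g (f x)) := by
  apply List.ext_getElem?; intro k
  by_cases h : n = k <;> simp [List.getElem?_modify, h, Function.comp_def]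

-- T[i][j] = 1 as a row-modify
lemma pv_setrow (T : List (List Int)) (i j : Int) (hi : 0 ≤ i) (hj : 0 ≤ j) :
    PySem.List.pySetD T i (PySem.List.pySetD (PySem.List.pyGetD T i []) j 1)
      = T.modify i.toNat (fun row => row.set j.toNat 1) := by
  rw [PySem.List.pySetD_of_nonneg _ _ hi, PySem.List.pySetD_of_nonneg _ _ hj,
    PySem.List.pyGetD_of_nonneg _ _ hi]
  apply List.ext_getElem?; intro k
  by_cases hk : i.toNat = k
  · subst hk
    by_cases hn : i.toNat < T.length
    · simp [List.getElem?_set, List.getElem?_modify, List.getD_eq_getElem?_getD, hn,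
        List.getElem?_eq_getElem hn]
    · simp [List.getElem?_set, List.getElem?_modify, hn,
        List.getElem?_eq_none (le_of_not_gt hn)]
  · simp [List.getElem?_set, List.getElem?_modify, hk]

-- commute the fixed-row modify out of a fold
lemma pv_foldl_modify_comm {σ : Type} (n : Nat) (c : σ → Prop) [DecidablePred c]
    (g : σ → List Int → List Int) :
    ∀ (l : List σ) (T : List (List Int)),
      l.foldl (fun T s => if c s then T.modify n (fun row => g s row) else T) T
        = T.modify n (fun row => l.foldl (fun row s => if c s then g s row else row) row) := by
  intro l
  induction l with
  | nil => intro T; simp [pv_modify_id]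
  | cons a l ih =>
    intro T
    by_cases h : c a
    · simp only [List.foldl_cons, if_pos h, ih, pv_modify_modify]
    · simp only [List.foldl_cons, if_neg h, ih]

-- a fold of modifies over pairwise-distinct nonnegative Int indices, read at one position
lemma pv_getElem?_foldl_modify (f : Int → List Int → List Int) :
    ∀ (l : List Int) (T : List (List Int)) (m : Nat), l.Nodup → (∀ x ∈ l, 0 ≤ x) →
      (l.foldl (fun T i => T.modify i.toNat (f i)) T)[m]?
        = if (m : Int) ∈ l then (T[m]?).map (f (m : Int)) else T[m]? := by
  intro l
  induction l with
  | nil => intro T m _ _; simp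
  | cons a l ih =>
    intro T m hnd hnn
    have ha : 0 ≤ a := hnn a (by simp)
    rw [List.foldl_cons, ih _ _ hnd.of_cons (fun x hx => hnn x (List.mem_cons_of_mem _ hx))]
    by_cases hm : (m : Int) = a
    · have hml : (m : Int) ∉ l := hm ▸ (List.nodup_cons.mp hnd).1
      have hmem : (m : Int) ∈ a :: l := by simp [hm]
      rw [if_neg hml, if_pos hmem, ← hm]
      simp [List.getElem?_modify]
    · have hat : ¬ a.toNat = m := by omega
      by_cases hml : (m : Int) ∈ l
      · rw [if_pos hml, if_pos (List.mem_cons_of_mem _ hml)]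
        simp [List.getElem?_modify, hat]
      · rw [if_neg hml, if_neg (by simp [hm, hml])]
        simp [List.getElem?_modify, hat]

-- value of a fold of 1-writes at a position
lemma pv_getElem?_foldl_write {σ : Type} (c : σ → Prop) [DecidablePred c] (pos : σ → Nat) :
    ∀ (l : List σ) (row : List Int) (k : Nat),
      (l.foldl (fun row s => if c s then row.set (pos s) 1 else row) row)[k]?
        = if (∃ s ∈ l, c s ∧ pos s = k) then (row.set k 1)[k]? else row[k]? := by
  intro l
  induction l with
  | nil => intro row k; simp
  | cons a l ih =>
    intro row k
    rw [List.foldl_cons, ih]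
    by_cases ha : c a
    · by_cases hpa : pos a = k
      · have h1 : (∃ s ∈ a :: l, c s ∧ pos s = k) := ⟨a, by simp, ha, hpa⟩
        rw [if_pos h1, if_pos ha]
        by_cases h2 : ∃ s ∈ l, c s ∧ pos s = k
        · rw [if_pos h2]
          simp [List.getElem?_set, hpa]
        · rw [if_neg h2, hpa]
      · have h3 : (row.set (pos a) 1)[k]? = row[k]? := by simp [List.getElem?_set, hpa]
        rw [if_pos ha]
        by_cases h2 : ∃ s ∈ l, c s ∧ pos s = k
        · have h1 : (∃ s ∈ a :: l, c s ∧ pos s = k) := by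
            obtain ⟨s, hs, h⟩ := h2; exact ⟨s, List.mem_cons_of_mem _ hs, h⟩
          rw [if_pos h2, if_pos h1]
          simp [List.getElem?_set, List.length_set]
        · have h1 : ¬(∃ s ∈ a :: l, c s ∧ pos s = k) := by
            rintro ⟨s, hs, hc, hpk⟩
            rcases List.mem_cons.mp hs with rfl | hs'
            · exact hpa hpk
            · exact h2 ⟨s, hs', hc, hpk⟩
          rw [if_neg h2, if_neg h1, h3]
    · rw [if_neg ha]
      by_cases h2 : ∃ s ∈ l, c s ∧ pos s = k
      · have h1 : (∃ s ∈ a :: l, c s ∧ pos s = k) := by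
          obtain ⟨s, hs, h⟩ := h2; exact ⟨s, List.mem_cons_of_mem _ hs, h⟩
        rw [if_pos h2, if_pos h1]
      · have h1 : ¬(∃ s ∈ a :: l, c s ∧ pos s = k) := by
          rintro ⟨s, hs, hc, hpk⟩
          rcases List.mem_cons.mp hs with rfl | hs'
          · exact ha hc
          · exact h2 ⟨s, hs', hc, hpk⟩
        rw [if_neg h2, if_neg h1]

-- A in normal form: a fold of row-modifies
lemma pv_A_norm (p : Int) :
    build_paley p
      = (PySem.List.pyRange 0 p).foldl (fun T i =>
          T.modify i.toNat (fun row =>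
            (PySem.List.pyRange 0 p).foldl (fun row j =>
              if i ≠ j ∧ PySem.Set.contains (pvQR p) (PySem.Int.mod (j - i) p) = true then
                row.set j.toNat 1
              else row) row))
        ((PySem.List.pyRange 0 p).map (fun _ => List.replicate p.toNat 0)) := by
  simp only [build_paley, pvQR_foldl]
  apply PySem.List.foldl_congr_mem
  intro T i hi
  have hi0 : 0 ≤ i := (PySem.List.mem_pyRange_one.mp hi).1
  rw [← pv_foldl_modify_comm]
  apply PySem.List.foldl_congr_mem
  intro T' j hj
  have hj0 : 0 ≤ j := (PySem.List.mem_pyRange_one.mp hj).1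
  split_ifs with h
  · exact pv_setrow T' i j hi0 hj0
  · rfl

-- A's inner loop builds exactly the spec row
lemma pv_rowA (p i : Int) (hp : 0 < p) :
    (PySem.List.pyRange 0 p).foldl (fun row j =>
        if i ≠ j ∧ PySem.Set.contains (pvQR p) (PySem.Int.mod (j - i) p) = true then
          row.set j.toNat 1
        else row) (List.replicate p.toNat 0)
      = pvRowSpec p i := by
  apply List.ext_getElem?; intro k
  rw [pv_getElem?_foldl_write]
  by_cases hk : k < p.toNat
  · have hex : (∃ j ∈ PySem.List.pyRange 0 p,
        (i ≠ j ∧ PySem.Set.contains (pvQR p) (PySem.Int.mod (j - i) p) = true) ∧ j.toNat = k)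
        ↔ (i ≠ (k : Int) ∧ PySem.Set.contains (pvQR p) (PySem.Int.mod ((k : Int) - i) p) = true) := by
      constructor
      · rintro ⟨j, hj, hc, rfl⟩
        obtain ⟨hj0, -⟩ := PySem.List.mem_pyRange_one.mp hj
        rw [Int.toNat_of_nonneg hj0]
        exact hc
      · intro hc
        exact ⟨(k : Int), PySem.List.mem_pyRange_one.mpr ⟨by positivity, by omega⟩, hc, by simp⟩
    rw [pvRowSpec]
    rw [List.getElem?_map, PySem.List.getElem?_pyRange_one]
    have hk' : k < (p - 0).toNat := by omega
    rw [if_pos hk']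
    simp only [Option.map_some, zero_add]
    rw [pvInd]
    by_cases hc : i ≠ (k : Int) ∧ PySem.Set.contains (pvQR p) (PySem.Int.mod ((k : Int) - i) p) = true
    · rw [if_pos (hex.mpr hc), if_pos hc]
      simp [List.getElem?_set, hk]
    · rw [if_neg (fun h => hc (hex.mp h)), if_neg hc]
      simp [List.getElem?_replicate, hk]
  · have h1 : ¬ (∃ j ∈ PySem.List.pyRange 0 p,
        (i ≠ j ∧ PySem.Set.contains (pvQR p) (PySem.Int.mod (j - i) p) = true) ∧ j.toNat = k) := by
      rintro ⟨j, hj, -, rfl⟩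
      obtain ⟨hj0, hjp⟩ := PySem.List.mem_pyRange_one.mp hj
      omega
    rw [if_neg h1, pvRowSpec]
    rw [List.getElem?_map, PySem.List.getElem?_pyRange_one]
    have hk' : ¬ k < (p - 0).toNat := by omega
    rw [if_neg hk']
    simp [List.getElem?_replicate, hk]

-- A equals the spec matrix
lemma pv_A_eq_M (p : Int) (hp : 0 < p) : build_paley p = pvM p := by
  rw [pv_A_norm]
  apply List.ext_getElem?; intro m
  rw [pv_getElem?_foldl_modify _ _ _ _ (PySem.List.nodup_pyRange_one 0 p)
    (fun x hx => (PySem.List.mem_pyRange_one.mp hx).1)]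
  rw [pvM, List.getElem?_map, List.getElem?_map, PySem.List.getElem?_pyRange_one]
  by_cases hm : m < (p - 0).toNat
  · rw [if_pos hm, if_pos (PySem.List.mem_pyRange_one.mpr ⟨by positivity, by omega⟩)]
    simp only [Option.map_some, zero_add, Option.some.injEq]
    exact pv_rowA p (m : Int) hp
  · have hmem : ¬ ((m : Int) ∈ PySem.List.pyRange 0 p) := by
      rw [PySem.List.mem_pyRange_one]; omega
    rw [if_neg hm, if_neg hmem]
    simp

-- the rotated base row read at a cell: arithmetic of the rotation offset
lemma pv_rot_arith (p i : Int) (k : Nat) (hi0 : 0 ≤ i) (hip : i < p) (hk : k < p.toNat) :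
    (((k + (p - i).toNat) % p.toNat : Nat) : Int) = PySem.Int.mod ((k : Int) - i) p := by
  rw [PySem.Int.mod_eq_emod_of_pos (by omega)]
  have h1 : (((k + (p - i).toNat) % p.toNat : Nat) : Int)
      = ((k : Int) + (p - i)) % p := by
    push_cast [Int.toNat_of_nonneg (by omega : (0:Int) ≤ p - i),
      Int.toNat_of_nonneg (by omega : (0:Int) ≤ p)]
    rfl
  rw [h1]
  have h2 : (k : Int) + (p - i) = ((k : Int) - i) + p * 1 := by ring
  rw [h2, Int.add_mul_emod_self_left]

-- B equals the spec matrix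
lemma pv_B_eq_M (p : Int) (hp : 0 < p) : build_paley_alt p = pvM p := by
  rw [build_paley_alt, pvM]
  have hqr : PySem.Set.ofList ((PySem.List.pyRange 1 p).map (fun x => PySem.Int.mod (x * x) p))
      = pvQR p := rfl
  simp only [hqr]
  apply List.map_congr_left
  intro i hi
  obtain ⟨hi0, hip⟩ := PySem.List.mem_pyRange_one.mp hi
  set base : List Int := (PySem.List.pyRange 0 p).map
    (fun j => if j ≠ 0 ∧ PySem.Set.contains (pvQR p) j = true then 1 else 0) with hbase
  have hlen : base.length = p.toNat := by
    rw [hbase, List.length_map, PySem.List.length_pyRange_one]; omega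
  have hn0 : (0:Int) ≤ p - i := by omega
  have hcast : p - i = (((p - i).toNat : Nat) : Int) := (Int.toNat_of_nonneg hn0).symm
  rw [hcast, PySem.List.slice_from_natCast, PySem.List.slice_to_natCast]
  set n : Nat := (p - i).toNat with hn
  have hnle : n ≤ base.length := by rw [hlen]; omega
  rw [← List.rotate_eq_drop_append_take hnle]
  apply List.ext_getElem?; intro k
  rw [pvRowSpec, List.getElem?_map, PySem.List.getElem?_pyRange_one]
  by_cases hk : k < (p - 0).toNat
  · have hkr : k < (base.rotate n).length := by rw [List.length_rotate, hlen]; omega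
    rw [List.getElem?_eq_getElem hkr, List.getElem_rotate, if_pos hk]
    simp only [hlen]
    simp only [hbase, List.getElem_map, PySem.List.getElem_pyRange_one, Option.map_some,
      zero_add, Option.some.injEq]
    have harith : (((k + n) % p.toNat : Nat) : Int) = PySem.Int.mod ((k : Int) - i) p := by
      rw [hn]
      exact pv_rot_arith p i k hi0 hip (by omega)
    rw [harith, pvInd]
    have hzero : PySem.Int.mod ((k : Int) - i) p = 0 ↔ i = (k : Int) := by
      rw [PySem.Int.mod_eq_emod_of_pos (by omega)]
      constructor
      · intro h0
        have hdvd : p ∣ ((k : Int) - i) := Int.dvd_of_emod_eq_zero h0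
        have : (k : Int) - i = 0 := Int.eq_zero_of_abs_lt_dvd hdvd (by rw [abs_lt]; omega)
        omega
      · intro h; rw [← h]; simp
    by_cases hc : i = (k : Int)
    · have hm0 : PySem.Int.mod (0 : Int) p = 0 := by
        rw [PySem.Int.mod_eq_emod_of_pos (by omega)]; simp
      simp [hc, hm0]
    · have hne : ¬ PySem.Int.mod ((k : Int) - i) p = 0 := fun h => hc (hzero.mp h)
      by_cases hq : PySem.Set.contains (pvQR p) (PySem.Int.mod ((k : Int) - i) p) = true
      · rw [if_pos ⟨hne, hq⟩, if_pos ⟨fun h => hc h, hq⟩]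
      · rw [if_neg (fun h => hq h.2), if_neg (fun h => hq h.2)]
  · rw [List.getElem?_eq_none (by rw [List.length_rotate, hlen]; omega), if_neg hk]
    simp

-- ===== VERDICT (by name: the statement is the Claim_ definition above) =====
theorem build_paley_spec : Claim_equal_build_paley := by
  intro p _
  unfold Spec_build_paley
  by_cases hp : 0 < p
  · rw [pv_A_eq_M p hp, pv_B_eq_M p hp]
  · have h0 : PySem.List.pyRange 0 p = [] := PySem.List.pyRange_one_eq_nil (by omega)
    have h1 : PySem.List.pyRange 1 p = [] := PySem.List.pyRange_one_eq_nil (by omega)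
    simp [build_paley, build_paley_alt, h0, h1]
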